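-- pv_equiv track=rewrite | github.com/sidhantunnithan/cusat-cse-degree | S7/Networks-Lab/Exp 8/server.py | getStringsDict
-- ===== SOURCE A (Python) =====
-- def getStringsDict(arr, keyword):
--     stringDict = {}
--     for i in range(len(keyword)):
--         if keyword[i] not in stringDict.keys():
--             stringDict[keyword[i]] = []
--         s = ""
--         for j in range(len(arr)):
--             s += arr[j][i]
--         stringDict[keyword[i]].append(s)
--     return stringDict
-- ===== SOURCE B (Python) =====
-- def getStringsDict(arr, keyword):
--     cols = [""] * len(keyword)
--     for row in arr:
--         cols = [c + row[i] for i, c in enumerate(cols)]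
--     stringDict = {}
--     for i in range(len(keyword)):
--         stringDict.setdefault(keyword[i], []).append(cols[i])
--     return stringDict
-- ===== Notes on version B (the rewrite author's own statement) =====
-- stated objective: alternative
-- what changed: A builds each column string with a nested column-major scan (for each keyword index, an inner loop over all rows) interleaved with dict bookkeeping; B does one row-major pass accumulating all column strings simultaneously, then a separate setdefault-based grouping pass.
import Mathlib
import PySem

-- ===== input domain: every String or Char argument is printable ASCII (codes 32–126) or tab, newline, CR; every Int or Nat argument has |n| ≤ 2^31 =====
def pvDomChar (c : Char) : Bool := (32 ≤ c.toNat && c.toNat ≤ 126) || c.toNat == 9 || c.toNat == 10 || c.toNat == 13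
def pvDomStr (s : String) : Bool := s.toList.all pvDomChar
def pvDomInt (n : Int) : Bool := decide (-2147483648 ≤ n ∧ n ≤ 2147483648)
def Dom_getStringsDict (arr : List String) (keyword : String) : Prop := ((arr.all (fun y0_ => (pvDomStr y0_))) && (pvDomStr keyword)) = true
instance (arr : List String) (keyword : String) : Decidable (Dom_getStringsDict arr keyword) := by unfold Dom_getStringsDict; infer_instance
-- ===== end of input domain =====

-- B replaces A's column-major nested loops by one row-major pass that accumulates all
-- column strings at once, then a separate grouping pass (objective: alternative decomposition).

-- keyword[i] / row[i] as the 1-char Python string it yields; [] where Python would raise (excluded by Pre_)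
def pvChr (s : String) (i : Int) : List Char := (PySem.Str.pyGet? s i).elim [] (fun c => [c])

-- ===== PORT A =====
def getStringsDict (arr : List String) (keyword : String) : List (String × List String) :=
  ((PySem.List.pyRange 0 (PySem.Str.len keyword) 1).foldl
    (fun d i =>
      let k : String := String.ofList (pvChr keyword i)
      let d := if d.contains k then d else d.insert k []
      let s : List Char :=
        (PySem.List.pyRange 0 (arr.length : Int) 1).foldl
          (fun s j => s ++ pvChr (PySem.List.pyGetD arr j "") i) []
      d.modify k [] (fun l => l ++ [String.ofList s]))
    PySem.Dict.empty).items

-- ===== PORT B =====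
def getStringsDict_alt (arr : List String) (keyword : String) : List (String × List String) :=
  let cols : List (List Char) :=
    arr.foldl
      (fun cols row => (PySem.List.enumerate cols).map (fun p => p.2 ++ pvChr row p.1))
      (List.replicate keyword.toList.length [])
  ((PySem.List.pyRange 0 (PySem.Str.len keyword) 1).foldl
    (fun d i =>
      let k : String := String.ofList (pvChr keyword i)
      d.insert k (d.getD k [] ++ [String.ofList (PySem.List.pyGetD cols i [])]))
    PySem.Dict.empty).items

-- ===== PRECONDITION & SPEC =====
-- Pre_ excludes exactly the inputs where Python A raises IndexError: some row shorter than keyword.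
def Pre_getStringsDict (arr : List String) (keyword : String) : Prop :=
  ∀ s ∈ arr, keyword.toList.length ≤ s.toList.length
instance (arr : List String) (keyword : String) : Decidable (Pre_getStringsDict arr keyword) := by
  unfold Pre_getStringsDict; infer_instance
def pvWitness_getStringsDict : List String × String := (["abc", "xyz"], "ab")

def Spec_getStringsDict (arr : List String) (keyword : String) (out : List (String × List String)) : Prop := out = getStringsDict_alt arr keyword
instance (arr : List String) (keyword : String) (out : List (String × List String)) : Decidable (Spec_getStringsDict arr keyword out) := by unfold Spec_getStringsDict; infer_instance

-- ===== CLAIM (what is proved, stated in full; the proofs are below) =====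
def Claim_equal_getStringsDict : Prop := ∀ (arr : List String) (keyword : String), Dom_getStringsDict arr keyword → Pre_getStringsDict arr keyword → Spec_getStringsDict arr keyword (getStringsDict arr keyword)

-- ===== LEMMAS AND PROOFS =====

-- the characters of column i, folded over the rows
def pvCol (arr : List String) (i : Int) : List Char :=
  arr.foldl (fun s row => s ++ pvChr row i) []

theorem pvCol_init (arr : List String) (i : Int) (s0 : List Char) :
    arr.foldl (fun s row => s ++ pvChr row i) s0 = s0 ++ pvCol arr i := by
  induction arr generalizing s0 with
  | nil => simp [pvCol]
  | cons row rows ih =>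
      simp only [pvCol, List.foldl_cons, List.nil_append]
      rw [ih, ih (pvChr row i)]
      simp

-- one row-major step of B updates every column accumulator at once
theorem pvStep_row (f : Int → List Char) (n : Int) (row : String) :
    (List.map (fun p : Int × List Char => p.2 ++ pvChr row p.1)
        (PySem.List.enumerate (List.map f (PySem.List.pyRange 0 n 1))))
      = (PySem.List.pyRange 0 n 1).map (fun i => f i ++ pvChr row i) := by
  rw [PySem.List.enumerate_eq_map_pyRange _ ([] : List Char), List.map_map]
  simp only [PySem.List.len_eq, List.length_map, PySem.List.length_pyRange_one]
  have hrange : PySem.List.pyRange 0 (((n - 0).toNat : Nat) : Int) 1 = PySem.List.pyRange 0 n 1 := by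
    rcases le_or_gt n 0 with h | h
    · rw [PySem.List.pyRange_one_eq_nil (by omega), PySem.List.pyRange_one_eq_nil h]
    · congr 1; omega
  rw [hrange]
  refine List.map_congr_left ?_
  intro j hj
  rw [PySem.List.mem_pyRange_one] at hj
  simp only [Function.comp]
  rw [PySem.List.pyGetD_map_pyRange_of_nonneg f n j [] hj.1 hj.2]

-- invariant of B's first pass: the accumulators hold exactly the column strings
theorem pvCols_inv (arr : List String) (n : Int) (f : Int → List Char) :
    arr.foldl
      (fun cols row => (PySem.List.enumerate cols).map (fun p => p.2 ++ pvChr row p.1))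
      ((PySem.List.pyRange 0 n 1).map f)
    = (PySem.List.pyRange 0 n 1).map (fun i => f i ++ pvCol arr i) := by
  induction arr generalizing f with
  | nil => simp [pvCol]
  | cons row rows ih =>
      simp only [List.foldl_cons]
      rw [pvStep_row f n row, ih (fun i => f i ++ pvChr row i)]
      refine List.map_congr_left ?_
      intro i _
      simp only [pvCol, List.foldl_cons, List.nil_append]
      rw [pvCol_init rows i (pvChr row i), List.append_assoc]
      rfl

-- A's ensure-key-then-append equals B's single setdefault-style insert
theorem pvStep_dict {d : PySem.Dict String (List String)} {k : String} {x : String} :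
    ((if d.contains k then d else d.insert k []).modify k [] (fun l => l ++ [x]))
      = d.insert k (d.getD k [] ++ [x]) := by
  by_cases h : d.contains k = true
  · rw [if_pos h]
    simp only [PySem.Dict.modify]
  · rw [if_neg h]
    simp only [PySem.Dict.modify]
    rw [PySem.Dict.getD_insert_self, PySem.Dict.insert_insert_self,
      PySem.Dict.getD_of_not_contains d [] (by simpa using h)]

theorem pvMain (arr : List String) (keyword : String) :
    getStringsDict arr keyword = getStringsDict_alt arr keyword := by
  unfold getStringsDict getStringsDict_alt
  have hrep : (List.replicate keyword.toList.length ([] : List Char))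
      = (PySem.List.pyRange 0 (keyword.toList.length : Int) 1).map (fun _ => ([] : List Char)) := by
    rw [List.map_const', PySem.List.length_pyRange_one]
    congr 1
  rw [hrep, pvCols_inv arr (keyword.toList.length : Int) (fun _ => ([] : List Char))]
  congr 1
  have hlen : PySem.Str.len keyword = (keyword.toList.length : Int) := by
    simp [PySem.Str.len_eq]
  rw [hlen]
  refine PySem.List.foldl_congr_mem _ _ _ _ ?_
  intro d i hi
  rw [PySem.List.mem_pyRange_one] at hi
  simp only []
  rw [pvStep_dict]
  congr 2
  rw [PySem.List.pyGetD_map_pyRange_of_nonneg _ _ _ _ hi.1 hi.2]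
  simp only [List.nil_append]
  exact congrArg (fun s => [String.ofList s])
    (PySem.List.foldl_pyRange_zero_pyGetD' arr "" (fun s row => s ++ pvChr row i) ([] : List Char))

-- ===== VERDICT (by name: the statement is the Claim_ definition above) =====
theorem getStringsDict_spec : Claim_equal_getStringsDict := by
  intro arr keyword _ _
  unfold Spec_getStringsDict
  exact pvMain arr keyword
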